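-- pv_equiv track=rewrite | github.com/don-alejandrino/aoc2023 | src/12.py | get_first_group_of_operational_springs
-- ===== SOURCE A (Python) =====
-- def get_first_group_of_operational_springs(springs):
--     group_length = 0
--     for i, char in enumerate(springs):
--         if char == "#":
--             group_length += 1
--         elif char == ".":
--             return group_length, i
--         else:
--             return 0, i
--     else:
--         return group_length, len(springs)
-- ===== SOURCE B (Python) =====
-- def get_first_group_of_operational_springs(springs):
--     # length of the leading run of '#'
--     run = len(springs) - len(springs.lstrip("#"))
--     if run == len(springs) or springs[run] == ".":
--         return run, run
--     return 0, run
-- ===== Notes on version B (the rewrite author's own statement) =====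
-- stated objective: idiomatic
-- what changed: B computes the leading '#' run length once with str.lstrip and makes a single post-scan branch, instead of A's enumerate loop with returns inside the branches.
import Mathlib
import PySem

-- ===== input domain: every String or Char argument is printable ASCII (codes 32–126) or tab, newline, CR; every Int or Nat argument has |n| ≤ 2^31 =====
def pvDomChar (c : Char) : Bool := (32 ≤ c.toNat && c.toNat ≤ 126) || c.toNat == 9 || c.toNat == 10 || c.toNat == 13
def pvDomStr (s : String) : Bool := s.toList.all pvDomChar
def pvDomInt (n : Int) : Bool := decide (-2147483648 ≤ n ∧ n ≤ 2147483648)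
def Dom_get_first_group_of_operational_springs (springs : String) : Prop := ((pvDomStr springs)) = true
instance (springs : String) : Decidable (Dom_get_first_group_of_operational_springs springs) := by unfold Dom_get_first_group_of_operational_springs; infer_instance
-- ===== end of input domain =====

-- B replaces A's enumerate loop (returns inside the branches) by one lstrip-computed
-- leading-'#' run length and a single post-scan branch; objective: idiomatic.

-- ===== PORT A =====
-- the enumerate loop: i is the running index, g the running group_length;
-- at the end of the string i equals len(springs), so the for-else returns (g, i)
def pvA_go (l : List Char) (i g : Int) : Int × Int :=
  match l with
  | [] => (g, i)
  | c :: rest =>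
    if c = '#' then pvA_go rest (i + 1) (g + 1)
    else if c = '.' then (g, i)
    else (0, i)

def get_first_group_of_operational_springs (springs : String) : Int × Int :=
  pvA_go springs.toList 0 0

-- ===== PORT B =====
def get_first_group_of_operational_springs_alt (springs : String) : Int × Int :=
  let l := springs.toList
  -- run = len(springs) - len(springs.lstrip("#"))
  let run : Int := (l.length : Int) - ((l.dropWhile (· = '#')).length : Int)
  if run = (l.length : Int) ∨ PySem.Str.pyGet? springs run = some '.' then (run, run)
  else (0, run)

-- ===== PRECONDITION & SPEC =====
def Spec_get_first_group_of_operational_springs (springs : String) (out : Int × Int) : Prop := out = get_first_group_of_operational_springs_alt springs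
instance (springs : String) (out : Int × Int) : Decidable (Spec_get_first_group_of_operational_springs springs out) := by unfold Spec_get_first_group_of_operational_springs; infer_instance

-- ===== CLAIM (what is proved, stated in full; the proofs are below) =====
def Claim_equal_get_first_group_of_operational_springs : Prop := ∀ (springs : String), Dom_get_first_group_of_operational_springs springs → Spec_get_first_group_of_operational_springs springs (get_first_group_of_operational_springs springs)

-- ===== LEMMAS AND PROOFS =====

-- characterisation of A's loop in terms of the dropWhile decomposition
theorem pvA_go_eq (l : List Char) (i g : Int) :
    pvA_go l i g =
      (let d := l.dropWhile (· = '#')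
       let run : Int := (l.length : Int) - (d.length : Int)
       if d = [] ∨ d.head? = some '.' then (g + run, i + run) else (0, i + run)) := by
  induction l generalizing i g with
  | nil => simp [pvA_go]
  | cons c rest ih =>
    by_cases hc : c = '#'
    · subst hc
      have hstep : pvA_go ('#' :: rest) i g = pvA_go rest (i + 1) (g + 1) := by
        simp [pvA_go]
      have hd : List.dropWhile (fun x => decide (x = '#')) ('#' :: rest)
          = List.dropWhile (fun x => decide (x = '#')) rest := by simp
      have hlen := List.length_dropWhile_le (fun x => decide (x = '#')) rest
      rw [hstep, ih]
      simp only [hd, List.length_cons]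
      split_ifs with h <;> · simp only [Prod.mk.injEq]; push_cast; constructor <;> first | trivial | ring
    · by_cases hdot : c = '.'
      · simp [pvA_go, hdot]
      · simp [pvA_go, hc, hdot]

theorem dropWhile_head?_eq_get? (l : List Char) :
    l[(l.takeWhile (· = '#')).length]? = (l.dropWhile (· = '#')).head? := by
  induction l with
  | nil => simp
  | cons c rest ih =>
    by_cases hc : c = '#'
    · simpa [hc, List.takeWhile_cons, List.dropWhile_cons] using ih
    · simp [hc]

-- ===== VERDICT (by name: the statement is the Claim_ definition above) =====
theorem get_first_group_of_operational_springs_spec : Claim_equal_get_first_group_of_operational_springs := by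
  intro springs _
  unfold Spec_get_first_group_of_operational_springs
  unfold get_first_group_of_operational_springs get_first_group_of_operational_springs_alt
  rw [pvA_go_eq]
  set l := springs.toList with hl
  have hsplit := List.takeWhile_append_dropWhile (p := (· = '#')) (l := l)
  have hlenadd : (l.takeWhile (· = '#')).length + (l.dropWhile (· = '#')).length = l.length := by
    rw [← List.length_append, hsplit]
  have hlen := List.length_dropWhile_le (fun x => decide (x = '#')) l
  have hrun : (l.length : Int) - ((l.dropWhile (· = '#')).length : Int)
      = ((l.takeWhile (· = '#')).length : Int) := by omega
  have hget : PySem.Str.pyGet? springs ((l.length : Int) - ((l.dropWhile (· = '#')).length : Int))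
      = (l.dropWhile (· = '#')).head? := by
    rw [hrun]
    have hnc := PySem.Str.pyGet?_natCast (s := springs) (n := (l.takeWhile (· = '#')).length)
    rw [hnc, ← hl, dropWhile_head?_eq_get?]
  have hempty : ((l.length : Int) - ((l.dropWhile (· = '#')).length : Int) = (l.length : Int))
      ↔ (l.dropWhile (· = '#')) = [] := by
    constructor
    · intro h
      have h0 : (l.dropWhile (· = '#')).length = 0 := by omega
      exact List.length_eq_zero_iff.mp h0
    · intro h; rw [h]; simp
  simp only [hget, hempty]
  split_ifs with h <;> simp
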